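-- pv_equiv track=rewrite | github.com/markclare1992/tennis | tennis/models/markov_model.py | is_winning_set_score
-- ===== SOURCE A (Python) =====
-- def is_winning_set_score(a: int, b: int) -> bool:
--     """Check if the set score (a, b) is a winning set score."""
--     if b > a:
--         return is_winning_set_score(b, a)
--     if a == 6 and b < 5:
--         return True
--     if a == 7 and b in [5, 6]:
--         return True
--     return False
-- ===== SOURCE B (Python) =====
-- WINNING_SET_SCORES = frozenset([
--     (6, 0), (6, 1), (6, 2), (6, 3), (6, 4),
--     (0, 6), (1, 6), (2, 6), (3, 6), (4, 6),
--     (7, 5), (5, 7), (7, 6), (6, 7),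
-- ])
--
--
-- def is_winning_set_score(a: int, b: int) -> bool:
--     """Check if the set score (a, b) is a winning set score."""
--     return (a, b) in WINNING_SET_SCORES
-- ===== Notes on version B (the rewrite author's own statement) =====
-- stated objective: simpler
-- what changed: Replaced the recursive swap-to-normalize plus comparison branches with a single membership test in a precomputed frozenset of all winning score pairs in both orderings.
-- intended difference: On inputs where one score is exactly 6 and the other is negative, A's unbounded `b < 5` branch returns True, while B returns False, the intended value since a negative game count can never be part of a winning set score. — e.g. on is_winning_set_score(6, -1): A returns true, B returns false
import Mathlib
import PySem

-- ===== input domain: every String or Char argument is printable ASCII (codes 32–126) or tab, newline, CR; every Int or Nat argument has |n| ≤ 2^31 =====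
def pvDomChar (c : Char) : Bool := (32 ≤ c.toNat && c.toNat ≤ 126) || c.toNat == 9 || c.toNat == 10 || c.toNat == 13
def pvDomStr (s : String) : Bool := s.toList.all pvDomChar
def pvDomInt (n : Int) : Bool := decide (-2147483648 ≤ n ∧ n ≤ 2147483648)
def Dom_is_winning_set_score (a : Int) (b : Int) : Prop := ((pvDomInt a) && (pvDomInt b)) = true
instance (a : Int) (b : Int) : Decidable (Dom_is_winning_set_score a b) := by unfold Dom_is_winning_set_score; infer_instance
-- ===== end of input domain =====

-- B replaces A's recursive swap-plus-branches test with a lookup in a precomputed table of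
-- winning score pairs (objective: simpler); on scores pairing 6 with a negative number A's
-- `b < 5` branch accidentally returns True, where B returns the intended False (see D_ below).

-- ===== PORT A =====
def is_winning_set_score (a : Int) (b : Int) : Bool :=
  if b > a then is_winning_set_score b a
  else if a == 6 && b < 5 then true
  else if a == 7 && (b == 5 || b == 6) then true
  else false
termination_by (if b > a then (1 : Nat) else 0)
decreasing_by simp_all; omega

-- ===== PORT B =====
def WINNING_SET_SCORES : List (Int × Int) :=
  [(6, 0), (6, 1), (6, 2), (6, 3), (6, 4),
   (0, 6), (1, 6), (2, 6), (3, 6), (4, 6),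
   (7, 5), (5, 7), (7, 6), (6, 7)]

def is_winning_set_score_alt (a : Int) (b : Int) : Bool :=
  WINNING_SET_SCORES.contains (a, b)

-- ===== PRECONDITION & SPEC =====
-- On inputs where one score is exactly 6 and the other is negative, A returns True (its
-- `b < 5` branch has no lower bound), while B returns False, the intended value: a
-- negative number of games is impossible and such a pair is not a winning set score.
def D_is_winning_set_score (a : Int) (b : Int) : Prop :=
  (a = 6 ∧ b < 0) ∨ (b = 6 ∧ a < 0)
instance (a : Int) (b : Int) : Decidable (D_is_winning_set_score a b) := by
  unfold D_is_winning_set_score; infer_instance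

def Spec_is_winning_set_score (a : Int) (b : Int) (out : Bool) : Prop :=
  ¬ D_is_winning_set_score a b → out = is_winning_set_score_alt a b
instance (a : Int) (b : Int) (out : Bool) : Decidable (Spec_is_winning_set_score a b out) := by
  unfold Spec_is_winning_set_score; infer_instance

def pvDiffWitness_is_winning_set_score : Int × Int := (6, -1)
def pvDiffWitnessOut_is_winning_set_score : Bool × Bool := (true, false)

-- ===== CLAIM (what is proved, stated in full; the proofs are below) =====
def Claim_unchanged_is_winning_set_score : Prop := ∀ (a : Int) (b : Int), Dom_is_winning_set_score a b → Spec_is_winning_set_score a b (is_winning_set_score a b)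
def Claim_changed_is_winning_set_score : Prop := Dom_is_winning_set_score (pvDiffWitness_is_winning_set_score.1) (pvDiffWitness_is_winning_set_score.2) ∧ D_is_winning_set_score (pvDiffWitness_is_winning_set_score.1) (pvDiffWitness_is_winning_set_score.2) ∧ is_winning_set_score (pvDiffWitness_is_winning_set_score.1) (pvDiffWitness_is_winning_set_score.2) = pvDiffWitnessOut_is_winning_set_score.1 ∧ is_winning_set_score_alt (pvDiffWitness_is_winning_set_score.1) (pvDiffWitness_is_winning_set_score.2) = pvDiffWitnessOut_is_winning_set_score.2 ∧ pvDiffWitnessOut_is_winning_set_score.1 ≠ pvDiffWitnessOut_is_winning_set_score.2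
def Claim_exact_is_winning_set_score : Prop := ∀ (a : Int) (b : Int), Dom_is_winning_set_score a b → D_is_winning_set_score a b → is_winning_set_score a b ≠ is_winning_set_score_alt a b

-- ===== LEMMAS AND PROOFS =====
lemma alt_eval (a b : Int) :
    is_winning_set_score_alt a b =
      ((a = 6 ∧ 0 ≤ b ∧ b ≤ 4) ∨ (b = 6 ∧ 0 ≤ a ∧ a ≤ 4) ∨
       (a = 7 ∧ (b = 5 ∨ b = 6)) ∨ (b = 7 ∧ (a = 5 ∨ a = 6)) : Bool) := by
  simp only [is_winning_set_score_alt, WINNING_SET_SCORES, List.contains_cons,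
    List.contains_nil, Bool.or_false]
  rw [Bool.eq_iff_iff]; simp [Prod.ext_iff]; omega

lemma a_eval (a b : Int) (hba : ¬ b > a) :
    is_winning_set_score a b =
      (if a == 6 && b < 5 then true
       else if a == 7 && (b == 5 || b == 6) then true else false) := by
  rw [is_winning_set_score]; simp [hba]

-- ===== VERDICT (by name: the statement is the Claim_ definition above) =====
theorem is_winning_set_score_spec : Claim_unchanged_is_winning_set_score := by
  intro a b _ hD
  unfold D_is_winning_set_score at hD
  by_cases hba : b > a
  · rw [is_winning_set_score, if_pos hba, a_eval b a (by omega), alt_eval]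
    split_ifs with h1 h2 <;> simp_all <;> omega
  · rw [a_eval a b hba, alt_eval]
    split_ifs with h1 h2 <;> simp_all <;> omega

theorem is_winning_set_score_changed : Claim_changed_is_winning_set_score := by
  unfold Claim_changed_is_winning_set_score
  refine ⟨by decide, by decide, ?_, by decide, by decide⟩
  show is_winning_set_score 6 (-1) = true
  rw [a_eval 6 (-1) (by omega)]; norm_num

theorem is_winning_set_score_tight : Claim_exact_is_winning_set_score := by
  intro a b _ hD
  unfold D_is_winning_set_score at hD
  rw [alt_eval]
  rcases hD with ⟨rfl, hb⟩ | ⟨rfl, ha⟩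
  · rw [a_eval 6 b (by omega)]
    split_ifs with h1 h2 <;> simp_all <;> omega
  · rw [is_winning_set_score, if_pos (by omega : (6:Int) > a),
        a_eval 6 a (by omega)]
    split_ifs with h1 h2 <;> simp_all <;> omega
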